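-- pv_equiv track=rewrite | github.com/lbl1985/git_streak | vis.py | get_activity
-- ===== SOURCE A (Python) =====
-- def get_activity(v, q):
--     """
--     get value is between in which area according to q
--     """
--     if v == 0:
--         return 0
--     if v == q[0]:
--         return 1
--     if v == q[-1]:
--         return len(q) - 1
--
--     for id, item in enumerate(q):
--         if (id < len(q) - 1):
--             if v >= item and v < q[id + 1]:
--                 return id + 1
-- ===== SOURCE B (Python) =====
-- import bisect
--
--
-- def get_activity(v, q):
--     """
--     get value is between in which area according to q
--     """
--     if v == 0:
--         return 0
--     if v == q[0]:
--         return 1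
--     if v == q[-1]:
--         return len(q) - 1
--     i = bisect.bisect_right(q, v)
--     if 0 < i < len(q):
--         return i
--     return None
-- ===== Notes on version B (the rewrite author's own statement) =====
-- stated objective: faster
-- what changed: A's linear scan over adjacent pairs is replaced by bisect.bisect_right (binary search) after the same special-case checks; Pre_ excludes q = [] with v != 0 (A raises IndexError) and unsorted q of length >= 3 with v strictly inside q's value range, where A's first-adjacent-pair-match value is an accident of scan order that binary search need not share.
-- outside the precondition, e.g. on get_activity(1, [0, 2, 0, 0]): A returns 1, B returns None
import Mathlib
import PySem

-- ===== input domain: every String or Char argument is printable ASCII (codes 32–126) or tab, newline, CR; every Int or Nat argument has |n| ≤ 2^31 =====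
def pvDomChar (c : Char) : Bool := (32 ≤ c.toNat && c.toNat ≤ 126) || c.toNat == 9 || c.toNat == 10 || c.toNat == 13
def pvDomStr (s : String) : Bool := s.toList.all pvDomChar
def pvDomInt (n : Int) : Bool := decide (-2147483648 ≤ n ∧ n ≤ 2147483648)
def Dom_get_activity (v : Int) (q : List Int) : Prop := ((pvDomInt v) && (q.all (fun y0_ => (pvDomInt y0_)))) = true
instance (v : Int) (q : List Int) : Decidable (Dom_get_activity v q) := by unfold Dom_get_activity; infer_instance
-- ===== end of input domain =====

-- B replaces A's O(n) linear scan over adjacent pairs by binary search (bisect_right) after the same special-case checks; equivalence is proved on the sorted bucket lists Pre_ admits.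

-- ===== PORT A =====
-- for id, item in enumerate(q): if id < len(q)-1: if v >= item and v < q[id+1]: return id+1
def scanA (v : Int) (q : List Int) : List (Int × Int) → Option Int
  | [] => none
  | (id, item) :: rest =>
      if id < (q.length : Int) - 1 then
        match PySem.List.pyGet? q (id + 1) with
        | some nxt => if v ≥ item ∧ v < nxt then some (id + 1) else scanA v q rest
        | none => none   -- unreachable: id < len(q)-1 and id ≥ 0 on every call
      else scanA v q rest

def get_activity (v : Int) (q : List Int) : Option Int :=
  if v = 0 then some 0
  else
    match PySem.List.pyGet? q 0, PySem.List.pyGet? q (-1) with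
    | some q0, some qn =>
        if v = q0 then some 1
        else if v = qn then some ((q.length : Int) - 1)
        else scanA v q (PySem.List.enumerate q 0)
    | _, _ => none       -- q = []: Python raises IndexError (excluded by Pre_)

-- ===== PORT B =====
def get_activity_alt (v : Int) (q : List Int) : Option Int :=
  if v = 0 then some 0
  else
    match q with
    | [] => none         -- q = []: Python raises IndexError on q[0] (excluded by Pre_)
    | q0 :: rest =>
        if v = q0 then some 1
        else if PySem.List.pyGet? (q0 :: rest) (-1) = some v then some ((q.length : Int) - 1)
        else
          -- i = bisect.bisect_right(q, v); return i if 0 < i < len(q) else None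
          let i := PySem.List.bisectRight (q0 :: rest) v
          if 0 < i ∧ i < (q0 :: rest).length then some (i : Int) else none

-- ===== PRECONDITION & SPEC =====
-- Pre_ excludes q = [] with v ≠ 0 (A raises IndexError on q[0]) and unsorted q of length ≥ 3 with
-- v strictly inside q's value range: q is a list of bucket boundaries, and on such q A's
-- first-adjacent-pair-match value is an accident of the scan order that binary search need not share.
def Pre_get_activity (v : Int) (q : List Int) : Prop :=
  v = 0 ∨ (q ≠ [] ∧ (q.length ≤ 2 ∨ q.Pairwise (· ≤ ·) ∨ (∀ x ∈ q, x ≤ v) ∨ (∀ x ∈ q, v < x)))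
instance (v : Int) (q : List Int) : Decidable (Pre_get_activity v q) := by
  unfold Pre_get_activity; infer_instance
def pvWitness_get_activity : Int × List Int := (5, [0, 3, 10])
def Spec_get_activity (v : Int) (q : List Int) (out : Option Int) : Prop := out = get_activity_alt v q
instance (v : Int) (q : List Int) (out : Option Int) : Decidable (Spec_get_activity v q out) := by
  unfold Spec_get_activity; infer_instance

-- ===== CLAIM (what is proved, stated in full; the proofs are below) =====
def Claim_equal_get_activity : Prop := ∀ (v : Int) (q : List Int), Dom_get_activity v q → Pre_get_activity v q → Spec_get_activity v q (get_activity v q)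

-- ===== LEMMAS AND PROOFS =====

-- A's forward scan, started at index k, is the first match among the adjacent pairs from k on
theorem scanA_eq_find (v : Int) (q : List Int) :
    ∀ (k : Nat),
      scanA v q (PySem.List.enumerate (q.drop k) (k : Int))
        = ((PySem.List.enumerate ((q.zip q.tail).drop k) (k : Int)).find?
            (fun p => decide (p.2.1 ≤ v ∧ v < p.2.2))).map (fun p => p.1 + 1) := by
  intro k
  induction hm : q.length - k using Nat.strong_induction_on generalizing k with
  | _ m ih =>
    by_cases hk : k < q.length
    · have hdrop : q.drop k = q[k] :: q.drop (k + 1) := List.drop_eq_getElem_cons hk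
      rw [hdrop, PySem.List.enumerate_cons]
      by_cases hlt : (k : Int) < (q.length : Int) - 1
      · have hk1 : k + 1 < q.length := by omega
        have hzlen : k < (q.zip q.tail).length := by
          simp [List.length_zip, List.length_tail]; omega
        have hzdrop : (q.zip q.tail).drop k
            = (q.zip q.tail)[k] :: (q.zip q.tail).drop (k + 1) :=
          List.drop_eq_getElem_cons hzlen
        have hzk : (q.zip q.tail)[k] = (q[k], q[k + 1]) := by
          have ht : k < q.tail.length := by simp [List.length_tail]; omega
          simp [List.getElem_zip, List.getElem_tail]
        rw [hzdrop, hzk, PySem.List.enumerate_cons]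
        have hget : PySem.List.pyGet? q ((k : Int) + 1) = some q[k + 1] := by
          have : ((k : Int) + 1) = ((k + 1 : Nat) : Int) := by push_cast; ring
          rw [this, PySem.List.pyGet?_natCast]
          simp [List.getElem?_eq_getElem hk1]
        simp only [scanA, hlt, if_pos, hget, List.find?_cons]
        by_cases hc : q[k] ≤ v ∧ v < q[k + 1]
        · have : v ≥ q[k] ∧ v < q[k + 1] := ⟨hc.1, hc.2⟩
          simp [this]
        · have hc' : ¬ (v ≥ q[k] ∧ v < q[k + 1]) := by
            intro h; exact hc ⟨h.1, h.2⟩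
          have heq : ((k : Int) + 1) = ((k + 1 : Nat) : Int) := by push_cast; ring
          simp only [hc']
          rw [heq]
          exact ih (q.length - (k + 1)) (by omega) (k + 1) rfl
      · -- k = len - 1 : guard fails, recurse; both sides of pairs are exhausted
        have hzlen : (q.zip q.tail).length ≤ k := by
          simp [List.length_zip, List.length_tail]; omega
        have hzdrop : (q.zip q.tail).drop k = [] := List.drop_eq_nil_of_le hzlen
        have hzdrop1 : (q.zip q.tail).drop (k + 1) = [] :=
          List.drop_eq_nil_of_le (by omega)
        simp only [scanA, hlt, if_false]
        have heq : ((k : Int) + 1) = ((k + 1 : Nat) : Int) := by push_cast; ring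
        rw [heq, ih (q.length - (k + 1)) (by omega) (k + 1) rfl, hzdrop, hzdrop1]
        simp [PySem.List.enumerate_nil]
    · have h1 : q.drop k = [] := List.drop_eq_nil_of_le (by omega)
      have h2 : (q.zip q.tail).drop k = [] := by
        apply List.drop_eq_nil_of_le
        simp [List.length_zip, List.length_tail]; omega
      rw [h1, h2]
      simp [PySem.List.enumerate, scanA]

-- On a sorted q, the first adjacent pair q[i] ≤ v < q[i+1] is exactly at bisect_right - 1
theorem scanA_eq_bisect (v : Int) (q : List Int) (hs : q.Pairwise (· ≤ ·)) :
    scanA v q (PySem.List.enumerate q 0)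
      = (if 0 < PySem.List.bisectRight q v ∧ PySem.List.bisectRight q v < q.length
          then some ((PySem.List.bisectRight q v : Nat) : Int) else none) := by
  obtain ⟨hle, hlo, hhi⟩ := PySem.List.bisectRight_spec q v hs
  set r := PySem.List.bisectRight q v with hr
  have h0 := scanA_eq_find v q 0
  simp only [List.drop_zero, Nat.cast_zero] at h0
  rw [h0]
  have hzel : ∀ (k : Nat) (h : k < (q.zip q.tail).length),
      (q.zip q.tail)[k] = (q[k]'(by simp [List.length_zip, List.length_tail] at h; omega),
        q[k + 1]'(by simp [List.length_zip, List.length_tail] at h; omega)) := by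
    intro k h
    have ht : k < q.tail.length := by
      simp [List.length_zip, List.length_tail] at h ⊢; omega
    simp [List.getElem_zip, List.getElem_tail]
  by_cases hcase : 0 < r ∧ r < q.length
  · obtain ⟨hr0, hrlen⟩ := hcase
    have hzlen : r - 1 < (q.zip q.tail).length := by
      simp [List.length_zip, List.length_tail]; omega
    have hfind :
        (PySem.List.enumerate (q.zip q.tail) 0).find?
            (fun p => decide (p.2.1 ≤ v ∧ v < p.2.2))
          = some (((r - 1 : Nat) : Int), (q[r - 1], q[r]'(hrlen))) := by
      rw [List.find?_eq_some_iff_getElem]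
      constructor
      · have h1 : q[r - 1] ≤ v := hlo (r - 1) (by omega) (by omega)
        have h2 : v < q[r]'(hrlen) := hhi r hrlen le_rfl
        simp [h1, h2]
      · refine ⟨r - 1, by simp [PySem.List.length_enumerate]; omega, ?_, ?_⟩
        · rw [PySem.List.getElem_enumerate]
          have := hzel (r - 1) hzlen
          have hidx : r - 1 + 1 = r := by omega
          simp only [this, hidx]
          norm_num
        · intro j hj
          rw [PySem.List.getElem_enumerate]
          have hjz : j < (q.zip q.tail).length := by omega
          rw [hzel j hjz]
          have : q[j + 1]'(by simp [List.length_zip, List.length_tail] at hjz; omega) ≤ v :=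
            hlo (j + 1) (by simp [List.length_zip, List.length_tail] at hjz; omega) (by omega)
          simp; omega
    rw [hfind]
    simp only [hr0, hrlen, and_self, if_pos, Option.map_some]
    have : ((r - 1 : Nat) : Int) + 1 = (r : Int) := by omega
    rw [this]
  · rw [if_neg hcase]
    rw [List.find?_eq_none.mpr, Option.map_none]
    intro p hp
    rw [PySem.List.mem_enumerate_iff] at hp
    obtain ⟨k, hk, hpk⟩ := hp
    have hk1 : k + 1 < q.length := by
      simp [List.length_zip, List.length_tail] at hk; omega
    rw [hzel k hk] at hpk
    subst hpk
    simp only [decide_eq_true_eq, not_and]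
    intro hle'
    by_cases hr0 : r = 0
    · exfalso
      have := hhi k (by omega) (by omega)
      omega
    · -- r ≠ 0 and ¬(0 < r ∧ r < len) force r = len, so q[k+1] ≤ v
      have hrlen : r = q.length := by omega
      have := hlo (k + 1) hk1 (by omega)
      omega

-- The fuel-based binary-search loop returns hi when no element exceeds x …
theorem bisectLoop_all_le (xs : List Int) (x : Int) (h : ∀ y ∈ xs, ¬ x < y) :
    ∀ (fuel lo hi : Nat), lo ≤ hi → hi ≤ xs.length → hi - lo ≤ fuel →
      PySem.List.bisectRightLoop xs x fuel lo hi = hi := by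
  intro fuel
  induction fuel with
  | zero =>
      intro lo hi h1 h2 h3
      have hlh : lo = hi := by omega
      simp [PySem.List.bisectRightLoop, hlh]
  | succ n ih =>
      intro lo hi h1 h2 h3
      by_cases hlt : lo < hi
      · have hmid : (lo + hi) / 2 < xs.length := by omega
        have hget : xs[(lo + hi) / 2]? = some (xs[(lo + hi) / 2]'hmid) :=
          List.getElem?_eq_getElem hmid
        have hy : ¬ x < xs[(lo + hi) / 2]'hmid := h _ (List.getElem_mem hmid)
        simp only [PySem.List.bisectRightLoop, hlt, if_pos, hget, hy]
        exact ih _ _ (by omega) h2 (by omega)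
      · have hlh : lo = hi := by omega
        simp [PySem.List.bisectRightLoop, hlh]

-- … and lo when every element exceeds x
theorem bisectLoop_all_gt (xs : List Int) (x : Int) (h : ∀ y ∈ xs, x < y) :
    ∀ (fuel lo hi : Nat), lo ≤ hi → hi ≤ xs.length → hi - lo ≤ fuel →
      PySem.List.bisectRightLoop xs x fuel lo hi = lo := by
  intro fuel
  induction fuel with
  | zero =>
      intro lo hi h1 h2 h3
      simp [PySem.List.bisectRightLoop]
  | succ n ih =>
      intro lo hi h1 h2 h3
      by_cases hlt : lo < hi
      · have hmid : (lo + hi) / 2 < xs.length := by omega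
        have hget : xs[(lo + hi) / 2]? = some (xs[(lo + hi) / 2]'hmid) :=
          List.getElem?_eq_getElem hmid
        have hy : x < xs[(lo + hi) / 2]'hmid := h _ (List.getElem_mem hmid)
        simp only [PySem.List.bisectRightLoop, hlt, if_pos, hget, hy]
        exact ih _ _ (by omega) (by omega) (by omega)
      · simp [PySem.List.bisectRightLoop, hlt]

-- A's scan returns None when no adjacent pair brackets v
theorem scanA_none (v : Int) (q : List Int)
    (h : ∀ (k : Nat) (hk : k + 1 < q.length), ¬ (q[k]'(by omega) ≤ v ∧ v < q[k + 1])) :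
    scanA v q (PySem.List.enumerate q 0) = none := by
  have h0 := scanA_eq_find v q 0
  simp only [List.drop_zero, Nat.cast_zero] at h0
  rw [h0, List.find?_eq_none.mpr, Option.map_none]
  intro p hp
  rw [PySem.List.mem_enumerate_iff] at hp
  obtain ⟨k, hk, hpk⟩ := hp
  have hk1 : k + 1 < q.length := by
    simp [List.length_zip, List.length_tail] at hk; omega
  have ht : k < q.tail.length := by simp [List.length_tail]; omega
  rw [show (q.zip q.tail)[k] = (q[k]'(by omega), q[k + 1]'hk1) by
    simp [List.getElem_zip, List.getElem_tail]] at hpk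
  subst hpk
  simpa using h k hk1

theorem ports_agree (v : Int) (q : List Int) (hpre : Pre_get_activity v q) :
    get_activity v q = get_activity_alt v q := by
  unfold get_activity get_activity_alt
  by_cases hv : v = 0
  · simp [hv]
  · rcases hpre with hv0 | ⟨hne, hd⟩
    · exact absurd hv0 hv
    simp only [hv, if_false]
    cases q with
    | nil => exact absurd rfl hne
    | cons q0 rest =>
      have h0 : PySem.List.pyGet? (q0 :: rest) 0 = some q0 :=
        PySem.List.pyGet?_zero_cons q0 rest
      have hn : PySem.List.pyGet? (q0 :: rest) (-1)
          = some ((q0 :: rest).getLast (by simp)) := by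
        rw [PySem.List.pyGet?_neg_one]
        simp [List.getLast?_eq_some_getLast]
      rw [h0, hn]
      by_cases h1 : v = q0
      · simp [h1]
      · by_cases h2 : v = (q0 :: rest).getLast (by simp)
        · subst h2
          by_cases hq : (q0 :: rest).getLast (by simp) = q0 <;> simp [hq, hn]
        · have h2' : ¬ (some ((q0 :: rest).getLast (by simp)) = some v) := by
            intro h
            exact h2 (Option.some.inj h).symm
          simp only [h1, h2, hn, h2', if_false]
          rcases hd with hlen | hs | hall | hgt
          · -- length ≤ 2: both sides computed outright
            match rest, hlen with
            | [], _ =>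
                by_cases ha : v < q0 <;>
                  simp [scanA, PySem.List.enumerate, PySem.List.bisectRight,
                    PySem.List.bisectRightLoop, ha]
            | [q1], _ =>
                by_cases hb : v < q1 <;> by_cases ha : v < q0 <;>
                  simp [scanA, PySem.List.enumerate, PySem.List.pyGet?,
                    PySem.List.pyIdx?, PySem.List.bisectRight,
                    PySem.List.bisectRightLoop, ha, hb]
          · exact scanA_eq_bisect v (q0 :: rest) hs
          · -- every element ≤ v: scan finds nothing, bisect returns len
            have hbr : PySem.List.bisectRight (q0 :: rest) v = (q0 :: rest).length := by
              simp only [PySem.List.bisectRight]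
              exact bisectLoop_all_le _ _ (fun y hy => not_lt.mpr (hall y hy)) _ _ _
                (by omega) le_rfl (by omega)
            rw [scanA_none v (q0 :: rest) (fun k hk => by
              have : (q0 :: rest)[k + 1] ≤ v := hall _ (List.getElem_mem hk)
              omega)]
            simp [hbr]
          · -- v below every element: scan finds nothing, bisect returns 0
            have hbr : PySem.List.bisectRight (q0 :: rest) v = 0 := by
              simp only [PySem.List.bisectRight]
              exact bisectLoop_all_gt _ _ hgt _ _ _ (by omega) le_rfl (by omega)
            rw [scanA_none v (q0 :: rest) (fun k hk => by
              have : v < (q0 :: rest)[k]'(by omega) := hgt _ (List.getElem_mem (by omega))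
              omega)]
            simp [hbr]

-- ===== VERDICT (by name: the statement is the Claim_ definition above) =====
theorem get_activity_spec : Claim_equal_get_activity := by
  intro v q _ hpre
  unfold Spec_get_activity
  exact ports_agree v q hpre
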